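-- pv_equiv track=rewrite | github.com/WenZi0809/RNA-architecture-underlies-discontinuous-transcription-and-evolution-of-coronavirus | git-scripts/ric_fun.py | get_max_line
-- ===== SOURCE A (Python) =====
-- def get_max_line(lines):
--     lists = list(lines)
--     out = []
--     n = 0
--     for l in lists:
--         if l == '|':
--             n+=1
--         else:
--             n = 0
--         out.append(n)
--     return max(out)
-- ===== SOURCE B (Python) =====
-- from itertools import groupby
--
-- def get_max_line(lines):
--     return max(len(list(g)) if k == '|' else 0 for k, g in groupby(list(lines)))
-- ===== Notes on version B (the rewrite author's own statement) =====
-- stated objective: idiomatic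
-- what changed: Replaces the per-element running-counter loop and appended counter list with itertools.groupby: consecutive equal elements are grouped once and the answer is the max group length among '|' groups (0 for other groups).
import Mathlib
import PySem

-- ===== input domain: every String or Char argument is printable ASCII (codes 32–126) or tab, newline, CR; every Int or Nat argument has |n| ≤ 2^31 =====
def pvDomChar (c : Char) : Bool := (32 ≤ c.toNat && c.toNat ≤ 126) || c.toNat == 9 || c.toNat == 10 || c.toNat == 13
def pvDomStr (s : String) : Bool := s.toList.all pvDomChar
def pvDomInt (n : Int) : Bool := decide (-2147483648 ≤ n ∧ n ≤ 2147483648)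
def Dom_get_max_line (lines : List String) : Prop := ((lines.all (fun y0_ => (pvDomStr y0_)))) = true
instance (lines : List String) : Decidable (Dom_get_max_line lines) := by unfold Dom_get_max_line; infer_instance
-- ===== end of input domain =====

-- B replaces A's running-counter loop with a groupby over consecutive equal elements
-- (more idiomatic, same cost); equivalence of the return value on nonempty input.

-- ===== PORT A =====
-- running counter: append the counter after each element, then max(out)
def get_max_line (lines : List String) : Int :=
  let lists := lines
  let st := lists.foldl (fun (st : List Int × Int) l =>
      (st.1 ++ [if l == "|" then st.2 + 1 else 0], if l == "|" then st.2 + 1 else 0))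
      (([] : List Int), (0 : Int))
  ((PySem.List.max? st.1 (fun y => y)).getD 0)   -- max(out); Pre_ guarantees out ≠ []

-- ===== PORT B =====
-- itertools.groupby ported by hand: list of (key, run length) of consecutive equal elements
def pvGroups : List String → List (String × Nat)
  | [] => []
  | x :: xs =>
    match pvGroups xs with
    | [] => [(x, 1)]
    | (y, n) :: rest => if x == y then (y, n + 1) :: rest else (x, 1) :: (y, n) :: rest

def pvGroupVal (kg : String × Nat) : Int := if kg.1 == "|" then (kg.2 : Int) else 0

def get_max_line_alt (lines : List String) : Int :=
  ((PySem.List.max? ((pvGroups lines).map pvGroupVal) (fun y => y)).getD 0)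

-- ===== PRECONDITION & SPEC =====
-- Pre_ excludes only the empty list, on which both A and B raise ValueError (max of empty sequence).
def Pre_get_max_line (lines : List String) : Prop := lines ≠ []
instance (lines : List String) : Decidable (Pre_get_max_line lines) := by unfold Pre_get_max_line; infer_instance
def pvWitness_get_max_line : List String := ["|", "|", "a", "|"]

def Spec_get_max_line (lines : List String) (out : Int) : Prop := out = get_max_line_alt lines
instance (lines : List String) (out : Int) : Decidable (Spec_get_max_line lines out) := by unfold Spec_get_max_line; infer_instance

-- ===== CLAIM (what is proved, stated in full; the proofs are below) =====
def Claim_equal_get_max_line : Prop := ∀ (lines : List String), Dom_get_max_line lines → Pre_get_max_line lines → Spec_get_max_line lines (get_max_line lines)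

-- ===== LEMMAS AND PROOFS =====

-- the list A's loop produces, as a structural recursion on the input
def pvOutA (n : Int) : List String → List Int
  | [] => []
  | l :: ls => (if l == "|" then n + 1 else 0) :: pvOutA (if l == "|" then n + 1 else 0) ls

lemma pvFoldA (ls : List String) : ∀ (acc : List Int) (n : Int),
    (ls.foldl (fun (st : List Int × Int) l =>
      ((st.1 ++ [if l == "|" then st.2 + 1 else 0]), (if l == "|" then st.2 + 1 else 0)))
      (acc, n)).1 = acc ++ pvOutA n ls := by
  induction ls with
  | nil => intro acc n; simp [pvOutA]
  | cons l ls ih =>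
    intro acc n
    simp only [List.foldl_cons, pvOutA, ih]
    simp

-- running max from 0 (Python max of a nonempty list of nonnegative ints)
def pvN (xs : List Int) : Int := xs.foldl max 0

lemma pvN_nonneg (xs : List Int) : 0 ≤ pvN xs := (PySem.List.le_foldl_max xs 0).1

lemma pvFoldl_max_max (t : List Int) : ∀ a b : Int, t.foldl max (max a b) = max a (t.foldl max b) := by
  induction t with
  | nil => intro a b; simp
  | cons h t ih => intro a b; simp only [List.foldl_cons, max_assoc, ih]

lemma pvN_cons {x : Int} (t : List Int) (hx : 0 ≤ x) : pvN (x :: t) = max x (pvN t) := by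
  have h1 : pvN (x :: t) = t.foldl max (max x 0) := by
    simp [pvN, max_comm x 0]
  rw [h1, pvFoldl_max_max]
  simp [pvN]

-- Python max(x::t) equals the running max from 0, when the head is nonnegative
lemma pvMax_bridge (x : Int) (t : List Int) (_hx : 0 ≤ x) :
    ((PySem.List.max? (x :: t) (fun y => y)).getD 0) = pvN (x :: t) := by
  rw [PySem.List.max?_id_cons]
  have h1 : pvN (x :: t) = t.foldl max (max 0 x) := rfl
  rw [h1, max_eq_right _hx]
  rfl

lemma pvGroupVal_nonneg (kg : String × Nat) : 0 ≤ pvGroupVal kg := by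
  unfold pvGroupVal; split <;> simp

-- B's value as a running max
def pvBv (ls : List String) : Int := pvN ((pvGroups ls).map pvGroupVal)

lemma pvBv_nonneg (ls : List String) : 0 ≤ pvBv ls := pvN_nonneg _

lemma pvGroups_cons (x : String) (xs : List String) :
    pvGroups (x :: xs) = match pvGroups xs with
      | [] => [(x, 1)]
      | (y, n) :: rest => if x == y then (y, n + 1) :: rest else (x, 1) :: (y, n) :: rest := rfl

-- the first group of x :: xs has key x
lemma pvGroups_head (x : String) (xs : List String) :
    ∃ k rest, pvGroups (x :: xs) = (x, k) :: rest := by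
  rw [pvGroups_cons]
  cases h : pvGroups xs with
  | nil => exact ⟨1, [], rfl⟩
  | cons p rest =>
    obtain ⟨y, n⟩ := p
    by_cases hx : x == y
    · have : y = x := (eq_of_beq hx).symm
      subst this
      exact ⟨n + 1, rest, by simp [hx]⟩
    · exact ⟨1, (y, n) :: rest, by simp [hx]⟩

-- length of the leading run of "|"
def pvPfx : List String → Nat
  | [] => 0
  | l :: ls => if l == "|" then pvPfx ls + 1 else 0

lemma pvGroups_pfx (ls : List String) (h : 0 < pvPfx ls) :
    ∃ rest, pvGroups ls = ("|", pvPfx ls) :: rest := by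
  induction ls with
  | nil => simp [pvPfx] at h
  | cons l ls ih =>
    by_cases hl : l == "|"
    · have hleq : l = "|" := eq_of_beq hl
      subst hleq
      by_cases hp : 0 < pvPfx ls
      · obtain ⟨rest, hrest⟩ := ih hp
        refine ⟨rest, ?_⟩
        rw [pvGroups_cons, hrest]
        simp [pvPfx]
      · have hz : pvPfx ls = 0 := by omega
        cases ls with
        | nil => exact ⟨[], by simp [pvGroups_cons, pvGroups, pvPfx]⟩
        | cons l' ls' =>
          have hl' : ¬ (l' == "|") = true := by
            intro hc; simp [pvPfx, hc] at hz
          obtain ⟨k, rest, hg⟩ := pvGroups_head l' ls'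
          refine ⟨(l', k) :: rest, ?_⟩
          have hne : ¬ ("|" == l') = true := by
            intro hc
            exact hl' (by simp [(eq_of_beq hc).symm])
          rw [pvGroups_cons, hg]
          simp only [hne, pvPfx]
          simp
          exact fun hc => hl' (by simp [hc])
    · simp [pvPfx, hl] at h

lemma pvPfx_le_Bv (ls : List String) : (pvPfx ls : Int) ≤ pvBv ls := by
  by_cases h : 0 < pvPfx ls
  · obtain ⟨rest, hrest⟩ := pvGroups_pfx ls h
    have h1 : pvBv ls = max ((pvPfx ls : Int)) (pvN (rest.map pvGroupVal)) := by
      rw [pvBv, hrest]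
      simp only [List.map_cons]
      rw [pvN_cons _ (by simp [pvGroupVal])]
      simp [pvGroupVal]
    rw [h1]; exact le_max_left _ _
  · have hz : pvPfx ls = 0 := by omega
    rw [hz]; exact_mod_cast pvBv_nonneg ls

-- KEY: the running max of A's counter list, started at counter n ≥ 0
lemma pvKey (ls : List String) : ∀ n : Int, 0 ≤ n →
    pvN (pvOutA n ls) = max (pvBv ls) (if 0 < pvPfx ls then n + pvPfx ls else 0) := by
  induction ls with
  | nil =>
    intro n hn
    simp [pvOutA, pvN, pvBv, pvGroups, pvPfx]
  | cons l ls ih =>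
    intro n hn
    by_cases hl : l == "|"
    · have hleq : l = "|" := eq_of_beq hl
      subst hleq
      have h1 : pvN (pvOutA n ("|" :: ls)) = max (n + 1) (pvN (pvOutA (n + 1) ls)) := by
        simp only [pvOutA, BEq.rfl, if_true]
        exact pvN_cons _ (by omega)
      rw [h1, ih (n + 1) (by omega)]
      have hpfx : pvPfx ("|" :: ls) = pvPfx ls + 1 := by simp [pvPfx]
      by_cases hp : 0 < pvPfx ls
      · -- merge with the leading "|" group of ls
        obtain ⟨rest, hrest⟩ := pvGroups_pfx ls hp
        have hBv' : pvBv ls = max ((pvPfx ls : Int)) (pvN (rest.map pvGroupVal)) := by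
          rw [pvBv, hrest]; simp only [List.map_cons]
          rw [pvN_cons _ (by simp [pvGroupVal])]; simp [pvGroupVal]
        have hBv : pvBv ("|" :: ls) = max ((pvPfx ls : Int) + 1) (pvN (rest.map pvGroupVal)) := by
          rw [pvBv, pvGroups_cons, hrest]
          simp only [BEq.rfl, if_true, List.map_cons]
          rw [pvN_cons _ (by simp [pvGroupVal]; positivity)]
          simp [pvGroupVal]
        have hR := pvN_nonneg (rest.map pvGroupVal)
        rw [hBv', hBv, hpfx, if_pos hp, if_pos (by omega)]
        push_cast
        omega
      · have hz : pvPfx ls = 0 := by omega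
        cases ls with
        | nil =>
          rw [hpfx, hz]
          simp [pvBv, pvGroups, pvOutA, pvN, pvPfx, pvGroupVal]
          omega
        | cons l' ls' =>
          have hl' : ¬ (l' == "|") = true := by
            intro hc; simp [pvPfx, hc] at hz
          obtain ⟨k, rest, hg⟩ := pvGroups_head l' ls'
          have hne : ¬ ("|" == l') = true := by
            intro hc
            exact hl' (by simp [(eq_of_beq hc).symm])
          have hBv : pvBv ("|" :: l' :: ls') = max 1 (pvBv (l' :: ls')) := by
            rw [pvBv, pvBv, pvGroups_cons ("|" : String) (l' :: ls'), hg]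
            simp only [hne, Bool.false_eq_true, if_false, List.map_cons]
            rw [pvN_cons _ (by simp [pvGroupVal]), pvN_cons _ (pvGroupVal_nonneg _)]
            have : pvGroupVal ("|", 1) = 1 := by simp [pvGroupVal]
            rw [this]
          have hBn := pvBv_nonneg (l' :: ls')
          rw [hBv, hpfx, hz, if_neg (by omega), if_pos (by omega)]
          push_cast
          omega
    · -- counter resets to 0
      have h1 : pvN (pvOutA n (l :: ls)) = max 0 (pvN (pvOutA 0 ls)) := by
        simp only [pvOutA, hl, Bool.false_eq_true, if_false]
        exact pvN_cons _ le_rfl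
      have hBv : pvBv (l :: ls) = pvBv ls := by
        rw [pvBv, pvBv, pvGroups_cons]
        cases hg : pvGroups ls with
        | nil => simp [pvN, pvGroupVal, hl]
        | cons p rest =>
          obtain ⟨y, m⟩ := p
          by_cases hxy : l == y
          · have hy : ¬ (y == "|") = true := by
              intro hc
              exact absurd (by simp [eq_of_beq hxy, eq_of_beq hc]) hl
            simp only [hxy, if_true, List.map_cons]
            rw [pvN_cons _ (pvGroupVal_nonneg _), pvN_cons _ (pvGroupVal_nonneg _)]
            simp [pvGroupVal, hy]
          · simp only [hxy, Bool.false_eq_true, if_false, List.map_cons]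
            rw [pvN_cons _ (pvGroupVal_nonneg _), pvN_cons _ (pvGroupVal_nonneg _)]
            have : pvGroupVal (l, 1) = 0 := by simp [pvGroupVal, hl]
            rw [this]
            have hm := pvN_nonneg (rest.map pvGroupVal)
            have hg0 := pvGroupVal_nonneg (y, m)
            omega
      have hpfx : pvPfx (l :: ls) = 0 := by simp [pvPfx, hl]
      rw [h1, ih 0 le_rfl, hBv, hpfx]
      have hP := pvPfx_le_Bv ls
      have hBn := pvBv_nonneg ls
      by_cases hp : 0 < pvPfx ls
      · rw [if_pos hp, if_neg (by omega)]; omega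
      · rw [if_neg hp, if_neg (by omega)]; omega

-- ===== VERDICT (by name: the statement is the Claim_ definition above) =====
theorem get_max_line_spec : Claim_equal_get_max_line := by
  intro lines _ hpre
  unfold Spec_get_max_line
  cases lines with
  | nil => exact absurd rfl hpre
  | cons l ls =>
    -- A's side
    have hA : get_max_line (l :: ls) = ((PySem.List.max? (pvOutA 0 (l :: ls)) (fun y => y)).getD 0) := by
      show ((PySem.List.max? ((l :: ls).foldl (fun (st : List Int × Int) l =>
        ((st.1 ++ [if l == "|" then st.2 + 1 else 0]), (if l == "|" then st.2 + 1 else 0)))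
        (([] : List Int), (0 : Int))).1 (fun y => y)).getD 0) = _
      rw [pvFoldA (l :: ls) [] 0]
      simp
    have hAN : get_max_line (l :: ls) = pvN (pvOutA 0 (l :: ls)) := by
      rw [hA]
      have h2 : pvOutA 0 (l :: ls) =
          (if l == "|" then (1 : Int) else 0) :: pvOutA (if l == "|" then 1 else 0) ls := by
        simp [pvOutA]
      rw [h2]
      exact pvMax_bridge _ _ (by split <;> omega)
    -- B's side
    obtain ⟨k, rest, hg⟩ := pvGroups_head l ls
    have hB : get_max_line_alt (l :: ls) = pvBv (l :: ls) := by
      unfold get_max_line_alt pvBv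
      rw [hg]
      simp only [List.map_cons]
      exact pvMax_bridge _ _ (pvGroupVal_nonneg _)
    rw [hAN, hB, pvKey (l :: ls) 0 le_rfl]
    have hP := pvPfx_le_Bv (l :: ls)
    have hBn := pvBv_nonneg (l :: ls)
    by_cases hp : 0 < pvPfx (l :: ls)
    · rw [if_pos hp]; push_cast; omega
    · rw [if_neg hp]; omega
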